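/-
  SMALL FACTS ABOUT THE MODEL OF jsmn (Json/Jsmn/Model.lean) that every pure proof needs:
  the 32-bit wrappers `u32` / `i32`, reading and writing the token list (`getD` / `set`, `tokAt` / `tokUpd`), the backward scans
  (`scanOpen`, `scanOpenContainer` return an index below their argument), the loop test `more`, and WHITESPACE SKIPPING:
  `k` whitespace characters from `pos` advance the main loop's `pos` by `k` and change nothing else (`loop_ws_skip`).
-/
import Json.Jsmn.Inv

namespace Jsmn

/-! ### `u32`, `i32` -/

/-- An `unsigned int` value is below 2^32. -/
theorem u32_lt (x : Int) : u32 x < 4294967296 := by unfold u32; omega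

/-- No wrap: an integer already in [0, 2^32) is its own `unsigned int` value. -/
theorem u32_of_range {x : Int} (h0 : 0 ≤ x) (h1 : x < 4294967296) : u32 x = x.toNat := by unfold u32; omega

/-- No wrap, for a natural number. -/
theorem u32_of_lt {n : Nat} (h : n < 4294967296) : u32 (n : Int) = n := by unfold u32; omega

/-- No wrap, for `n + 1` (the shape `pos++` / `toknext++` has in the model). -/
theorem u32_succ {n : Nat} (h : n + 1 < 4294967296) : u32 ((n : Int) + 1) = n + 1 := by unfold u32; omega

/-- `pos--` after a `pos++`: nothing happens (for `1 ≤ n < 2^32`). -/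
theorem u32_pred {n : Nat} (h0 : 1 ≤ n) (h : n < 4294967296) : u32 ((n : Int) - 1) = n - 1 := by unfold u32; omega

/-- An `int` value lies in [-2^31, 2^31). -/
theorem i32_range (x : Int) : -2147483648 ≤ i32 x ∧ i32 x < 2147483648 := by unfold i32; omega

/-- No wrap: an integer already in [-2^31, 2^31) is its own `int` value. -/
theorem i32_of_range {x : Int} (h0 : -2147483648 ≤ x) (h1 : x < 2147483648) : i32 x = x := by unfold i32; omega

/-! ### the loop test -/

/-- Whitespace for jsmn_parse: tab, CR, LF, space. -/
def isWs (c : UInt8) : Bool := c == 0x09 || c == 0x0d || c == 0x0a || c == 0x20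

/-- The loop test `pos < len && js[pos] != 0` holds: `pos` is inside the text. -/
theorem more_lt {js : List UInt8} {pos : Nat} (h : more js pos = true) : pos < js.length := by
  simp [more] at h; exact h.1

/-- The loop test holds exactly when `pos` is inside the text and the byte there is not NUL. -/
theorem more_iff {js : List UInt8} {pos : Nat} : more js pos = true ↔ pos < js.length ∧ charAt js pos ≠ 0 := by
  simp [more]

/-- Beyond the end of the text the loop test fails. -/
theorem more_of_ge {js : List UInt8} {pos : Nat} (h : js.length ≤ pos) : more js pos = false := by
  simp [more]; omega

/-! ### reading and writing the token list -/

/-- Writing a token does not change the length of the array. -/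
theorem length_set (ts : Tokens) (i : Nat) (t : Token) : (ts.set i t).length = ts.length := List.length_set

/-- Reading back the token just written (inside the array). -/
theorem getD_set_eq {ts : Tokens} {i : Nat} (t : Token) (h : i < ts.length) : (ts.set i t).getD i default = t := by
  simp [List.getD_eq_getElem?_getD, h]

/-- Writing token `i` does not change token `j ≠ i`. -/
theorem getD_set_ne {ts : Tokens} {i j : Nat} (t : Token) (h : i ≠ j) : (ts.set i t).getD j default = ts.getD j default := by
  simp [List.getD_eq_getElem?_getD, h]

/-- Reading any token after a write: the new token at `i` (if inside), the old one elsewhere. -/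
theorem getD_set (ts : Tokens) (i j : Nat) (t : Token) :
    (ts.set i t).getD j default = if i = j ∧ i < ts.length then t else ts.getD j default := by
  by_cases h : i = j
  · subst h
    by_cases h2 : i < ts.length
    · simp [List.getD_eq_getElem?_getD, h2]
    · simp [List.getD_eq_getElem?_getD, h2]
  · simp [List.getD_eq_getElem?_getD, h]

/-- `tokens[i]` for a non-negative `int` index. -/
theorem tokAt_nonneg {ts : Tokens} {i : Int} (h : 0 ≤ i) : tokAt ts i = ts.getD i.toNat default := by
  unfold tokAt; rw [if_neg (by omega)]

/-- `tokens[i]` for a natural-number index. -/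
theorem tokAt_nat (ts : Tokens) (i : Nat) : tokAt ts (i : Int) = ts.getD i default := by
  rw [tokAt_nonneg (by omega)]; simp

/-- `tokens[i] = f (tokens[i])` for a non-negative `int` index. -/
theorem tokUpd_nonneg {ts : Tokens} {i : Int} (f : Token → Token) (h : 0 ≤ i) :
    tokUpd ts i f = ts.set i.toNat (f (ts.getD i.toNat default)) := by
  unfold tokUpd; rw [if_neg (by omega), tokAt_nonneg h]

/-- An update does not change the length of the array. -/
theorem length_tokUpd (ts : Tokens) (i : Int) (f : Token → Token) : (tokUpd ts i f).length = ts.length := by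
  unfold tokUpd; split <;> simp

/-! ### the backward scans -/

/-- `scanOpen ts n` answers an index BELOW `n`, of an open token, and every token between it and `n` is not open. -/
theorem scanOpen_some {ts : Tokens} {n j : Nat} (h : scanOpen ts n = some j) :
    j < n ∧ (ts.getD j default).isOpen = true ∧ ∀ k, j < k → k < n → (ts.getD k default).isOpen = false := by
  induction n with
  | zero => simp [scanOpen] at h
  | succ n ih =>
    unfold scanOpen at h
    split at h
    · rename_i ho
      have : n = j := by simpa using h
      subst this
      exact ⟨by omega, ho, fun k h1 h2 => by omega⟩
    · rename_i ho
      have ⟨a, b, c⟩ := ih h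
      refine ⟨by omega, b, fun k h1 h2 => ?_⟩
      by_cases hk : k = n
      · subst hk; simpa using ho
      · exact c k h1 (by omega)

/-- `scanOpen ts n = none`: no token below `n` is open. -/
theorem scanOpen_none {ts : Tokens} {n : Nat} (h : scanOpen ts n = none) : ∀ k, k < n → (ts.getD k default).isOpen = false := by
  induction n with
  | zero => intro k hk; omega
  | succ n ih =>
    unfold scanOpen at h
    split at h
    · simp at h
    · rename_i ho
      intro k hk
      by_cases hkn : k = n
      · subst hkn; simpa using ho
      · exact ih h k (by omega)

/-- The index `scanOpen` answers is below its argument. -/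
theorem scanOpen_lt {ts : Tokens} {n j : Nat} (h : scanOpen ts n = some j) : j < n := (scanOpen_some h).1

/-- `scanOpenContainer ts n` answers an index BELOW `n`, of an open object or array. -/
theorem scanOpenContainer_some {ts : Tokens} {n j : Nat} (h : scanOpenContainer ts n = some j) :
    j < n ∧ (ts.getD j default).isOpen = true ∧ ((ts.getD j default).type = JSMN_ARRAY ∨ (ts.getD j default).type = JSMN_OBJECT) := by
  induction n with
  | zero => simp [scanOpenContainer] at h
  | succ n ih =>
    unfold scanOpenContainer at h
    simp only at h
    split at h
    · rename_i ho
      have : n = j := by simpa using h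
      subst this
      simp at ho
      exact ⟨by omega, ho.2, ho.1⟩
    · have ⟨a, b⟩ := ih h
      exact ⟨by omega, b⟩

/-- The index `scanOpenContainer` answers is below its argument. -/
theorem scanOpenContainer_lt {ts : Tokens} {n j : Nat} (h : scanOpenContainer ts n = some j) : j < n :=
  (scanOpenContainer_some h).1

/-! ### whitespace skipping -/

/-- A whitespace character is not NUL. -/
theorem isWs_ne_zero {c : UInt8} (h : isWs c = true) : c ≠ 0 := by
  intro h0; subst h0; revert h; decide

/-- On a whitespace character the body of jsmn_parse's loop does nothing. -/
theorem body_ws (cfg : Config) (js : List UInt8) (fuel n : Nat) (s : St) {c : UInt8} (h : isWs c = true) :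
    body cfg js fuel n s c = some (.next s) := by
  have h' : ((c = 0x09 ∨ c = 0x0d) ∨ c = 0x0a) ∨ c = 0x20 := by simpa [isWs] using h
  rcases h' with ((h | h) | h) | h <;> subst h <;> simp [body]

/-- One trip through the main loop at a whitespace character: `pos++` (modulo 2^32) and nothing else. -/
theorem loop_ws_step (cfg : Config) (js : List UInt8) (n fuel : Nat) (s : St)
    (hin : s.p.pos < js.length) (hws : isWs (charAt js s.p.pos) = true) :
    loop cfg js n (fuel + 1) s = loop cfg js n fuel { s with p := { s.p with pos := u32 (s.p.pos + 1) } } := by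
  have hm : more js s.p.pos = true := more_iff.2 ⟨hin, isWs_ne_zero hws⟩
  rw [loop, if_pos hm, body_ws cfg js _ n s hws]

/-- **Whitespace skipping.** If the `k` characters of `js` from `pos` on are whitespace (inside the text, no 32-bit wrap), then `k` trips
through the main loop of jsmn_parse advance `pos` by `k` and change nothing else: the tokens, `toknext`, `toksuper` and `count` are
untouched. -/
theorem loop_ws_skip (cfg : Config) (js : List UInt8) (n : Nat) (k fuel : Nat) (s : St)
    (hws : ∀ i, i < k → isWs (charAt js (s.p.pos + i)) = true)
    (hlen : s.p.pos + k ≤ js.length) (h32 : s.p.pos + k < 4294967296) :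
    loop cfg js n (fuel + k) s = loop cfg js n fuel { s with p := { s.p with pos := s.p.pos + k } } := by
  induction k generalizing s with
  | zero => rfl
  | succ k ih =>
    have h0 := hws 0 (by omega)
    rw [show fuel + (k + 1) = (fuel + k) + 1 by omega, loop_ws_step cfg js n _ s (by omega) (by simpa using h0)]
    have hu : u32 ((s.p.pos : Int) + 1) = s.p.pos + 1 := u32_succ (by omega)
    rw [hu, ih]
    · simp only [show s.p.pos + 1 + k = s.p.pos + (k + 1) by omega]
    · intro i hi
      have := hws (i + 1) (by omega)
      simpa [show s.p.pos + 1 + i = s.p.pos + (i + 1) by omega] using this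
    · simp only; omega
    · simp only; omega

end Jsmn
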